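-- pv_equiv track=rewrite | github.com/milnet01/Vestige | tools/audit/lib/tier4_includes.py | _detect_circular
-- ===== SOURCE A (Python) =====
-- def _detect_circular(graph: dict[str, list[str]]) -> list[tuple[str, str]]:
--     """Find circular includes using Tarjan's SCC algorithm.
--
--     Returns pairs from all cycles found (not just direct A↔B).
--     """
--     # Build resolved adjacency list
--     adj: dict[str, list[str]] = {}
--     for node, includes in graph.items():
--         resolved = []
--         for inc in includes:
--             key = _resolve_include(inc, graph)
--             if key:
--                 resolved.append(key)
--         adj[node] = resolved
--
--     # Tarjan's SCC
--     index_counter = [0]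
--     stack: list[str] = []
--     on_stack: set[str] = set()
--     indices: dict[str, int] = {}
--     lowlinks: dict[str, int] = {}
--     sccs: list[list[str]] = []
--
--     def strongconnect(v: str) -> None:
--         indices[v] = index_counter[0]
--         lowlinks[v] = index_counter[0]
--         index_counter[0] += 1
--         stack.append(v)
--         on_stack.add(v)
--
--         for w in adj.get(v, []):
--             if w not in indices:
--                 strongconnect(w)
--                 lowlinks[v] = min(lowlinks[v], lowlinks[w])
--             elif w in on_stack:
--                 lowlinks[v] = min(lowlinks[v], indices[w])
--
--         if lowlinks[v] == indices[v]:
--             scc: list[str] = []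
--             while True:
--                 w = stack.pop()
--                 on_stack.discard(w)
--                 scc.append(w)
--                 if w == v:
--                     break
--             if len(scc) > 1:
--                 sccs.append(scc)
--
--     for node in adj:
--         if node not in indices:
--             strongconnect(node)
--
--     # Convert SCCs to pairs for backward compatibility
--     circular: list[tuple[str, str]] = []
--     seen: set[tuple[str, str]] = set()
--     for scc in sccs:
--         for i, a in enumerate(scc):
--             for b in scc[i + 1:]:
--                 pair = tuple(sorted((a, b)))
--                 if pair not in seen:
--                     seen.add(pair)
--                     circular.append(pair)
--
--     return circular
--
-- def _resolve_include(include_path: str, graph: dict[str, list[str]]) -> str | None: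
--     """Try to match an include path to a graph key."""
--     # Direct match
--     if include_path in graph:
--         return include_path
--     # Try matching the suffix (e.g., "renderer/shader.h" matches "engine/renderer/shader.h")
--     for key in graph:
--         if key.endswith(include_path) or key.endswith("/" + include_path):
--             return key
--     return None
-- ===== SOURCE B (Python) =====
-- def _detect_circular(graph):
--     """Iterative Tarjan: explicit frame stack instead of recursion; the SCC is
--     sliced off the Tarjan stack in one cut instead of popped element-wise, and
--     the pair list is deduplicated with dict.fromkeys instead of a seen-set."""
--     keys = list(graph)
--
--     def resolve(inc):
--         if inc in graph:
--             return inc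
--         for k in keys:
--             if k.endswith(inc) or k.endswith("/" + inc):
--                 return k
--         return None
--
--     adj = {node: [r for r in (resolve(i) for i in incs) if r]
--            for node, incs in graph.items()}
--
--     clock = 0
--     disc = {}
--     back = {}
--     tstack = []
--     active = set()
--     comps = []
--
--     for root in adj:
--         if root in disc:
--             continue
--         disc[root] = back[root] = clock
--         clock += 1
--         tstack.append(root)
--         active.add(root)
--         frames = [(root, adj.get(root, []))]
--         while frames:
--             v, ws = frames[-1]
--             if ws:
--                 w = ws[0]
--                 frames[-1] = (v, ws[1:])
--                 if w not in disc:
--                     disc[w] = back[w] = clock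
--                     clock += 1
--                     tstack.append(w)
--                     active.add(w)
--                     frames.append((w, adj.get(w, [])))
--                 elif w in active:
--                     dw = disc[w]
--                     if dw < back[v]:
--                         back[v] = dw
--             else:
--                 frames.pop()
--                 if back[v] == disc[v]:
--                     cut = tstack.index(v)
--                     comp = tstack[cut:][::-1]
--                     del tstack[cut:]
--                     active.difference_update(comp)
--                     if len(comp) > 1:
--                         comps.append(comp)
--                 if frames:
--                     u = frames[-1][0]
--                     if back[v] < back[u]:
--                         back[u] = back[v]
--
--     pairs = [(a, b) if a <= b else (b, a)
--              for comp in comps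
--              for i, a in enumerate(comp)
--              for b in comp[i + 1:]]
--     return list(dict.fromkeys(pairs))
-- ===== Notes on version B (the rewrite author's own statement) =====
-- stated objective: alternative
-- what changed: Tarjan's recursive strongconnect becomes an iterative loop over an explicit stack of (node, remaining-successors) frames, each SCC is sliced off the Tarjan stack in one cut (tstack.index + slice) instead of popped element-wise, the adjacency is built by a dict comprehension over a generator filter, and the final pair list is deduplicated with dict.fromkeys over one flat comprehension instead of a seen-set loop.
import Mathlib
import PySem

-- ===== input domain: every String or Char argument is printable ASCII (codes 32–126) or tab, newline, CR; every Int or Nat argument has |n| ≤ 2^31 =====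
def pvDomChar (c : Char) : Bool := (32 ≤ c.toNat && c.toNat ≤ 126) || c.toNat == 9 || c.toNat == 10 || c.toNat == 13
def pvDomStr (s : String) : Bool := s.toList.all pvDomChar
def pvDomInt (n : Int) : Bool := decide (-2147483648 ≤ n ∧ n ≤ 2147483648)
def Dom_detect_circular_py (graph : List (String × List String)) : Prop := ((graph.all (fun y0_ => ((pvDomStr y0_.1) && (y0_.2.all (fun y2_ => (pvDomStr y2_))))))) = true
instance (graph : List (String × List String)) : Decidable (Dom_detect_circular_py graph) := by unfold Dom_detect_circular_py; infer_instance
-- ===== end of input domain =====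

-- B replaces Tarjan's recursive strongconnect by an iterative frame-stack loop,
-- slices each SCC off the Tarjan stack in one cut instead of popping element-wise,
-- and deduplicates the pair list with dict.fromkeys instead of a seen-set;
-- objective: alternative decomposition (no recursion), same cost.

-- ===== PORT A =====
-- _resolve_include of Source A
def resolve_include_py (inc : String) (g : PySem.Dict String (List String)) : Option String :=
  if (g.get? inc).isSome then some inc
  else g.keys.find? (fun key =>
    PySem.Str.endswith key inc || PySem.Str.endswith key ("/" ++ inc))

-- the inner `for inc in includes: … if key: resolved.append(key)` loop
-- (Python `if key:` is false for None and for the empty string)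
def resolve_list_py (incs : List String) (g : PySem.Dict String (List String)) : List String :=
  incs.foldl (fun res inc =>
    match resolve_include_py inc g with
    | some k => if k = "" then res else res ++ [k]
    | none => res) []

def build_adj_py (g : PySem.Dict String (List String)) : PySem.Dict String (List String) :=
  g.items.foldl (fun adj p => adj.insert p.1 (resolve_list_py p.2 g)) PySem.Dict.empty

-- A's Tarjan state (counter, stack, on_stack, indices, lowlinks, sccs); the Python
-- `stack` (append/pop at the end) is kept top-first: append = cons, pop = head.
structure TjSt where
  cnt : Int
  stk : List String
  onStk : PySem.Set String
  idx : PySem.Dict String Int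
  low : PySem.Dict String Int
  sccs : List (List String)
deriving Repr, DecidableEq

-- indices[v] = lowlinks[v] = counter; counter += 1; stack.append(v); on_stack.add(v)
def tjInit (v : String) (S : TjSt) : TjSt :=
  { cnt := S.cnt + 1, stk := v :: S.stk, onStk := PySem.Set.add S.onStk v,
    idx := S.idx.insert v S.cnt, low := S.low.insert v S.cnt, sccs := S.sccs }

-- lowlinks[v] = min(lowlinks[v], lowlinks[w])   (v, w are always keys here: init ran)
def tjUpdLow (v w : String) (S : TjSt) : TjSt :=
  { S with low := S.low.insert v (min (S.low.getD v 0) (S.low.getD w 0)) }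

-- lowlinks[v] = min(lowlinks[v], indices[w])
def tjUpdIdx (v w : String) (S : TjSt) : TjSt :=
  { S with low := S.low.insert v (min (S.low.getD v 0) (S.idx.getD w 0)) }

-- the `while True: w = stack.pop(); …; if w == v: break` loop (v is always on the
-- stack here, so the empty case is unreachable)
def popLoop (v : String) : List String → PySem.Set String → List String →
    List String × PySem.Set String × List String
  | [], onS, scc => ([], onS, scc)
  | w :: rest, onS, scc =>
    let onS' := PySem.Set.discard onS w
    let scc' := scc ++ [w]
    if w = v then (rest, onS', scc') else popLoop v rest onS' scc'

-- `if lowlinks[v] == indices[v]: … pop the scc …; if len(scc) > 1: sccs.append(scc)`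
def tjRoot (v : String) (S : TjSt) : TjSt :=
  if S.low.getD v 0 = S.idx.getD v 0 then
    let r := popLoop v S.stk S.onStk []
    { S with stk := r.1, onStk := r.2.1,
             sccs := if r.2.2.length > 1 then S.sccs ++ [r.2.2] else S.sccs }
  else S

-- A's recursive strongconnect, with a structural fuel as totality guard (the fuel
-- passed at top level exceeds the number of distinct nodes, so 0 is never reached).
mutual
def scRun (f : Nat) (adj : PySem.Dict String (List String)) (v : String) (S : TjSt) : TjSt :=
  match f with
  | 0 => S
  | f + 1 => tjRoot v (scSuccs f adj v (adj.getD v []) (tjInit v S))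
termination_by (f, 0)

def scSuccs (f : Nat) (adj : PySem.Dict String (List String)) (v : String)
    (ws : List String) (S : TjSt) : TjSt :=
  match ws with
  | [] => S
  | w :: rest =>
    if S.idx.contains w = false then
      scSuccs f adj v rest (tjUpdLow v w (scRun f adj w S))
    else if PySem.Set.contains S.onStk w then
      scSuccs f adj v rest (tjUpdIdx v w S)
    else
      scSuccs f adj v rest S
termination_by (f, ws.length + 1)
end

-- `for node in adj: if node not in indices: strongconnect(node)`
def runRoots (f : Nat) (adj : PySem.Dict String (List String)) (keys : List String)
    (S : TjSt) : TjSt :=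
  keys.foldl (fun S node => if S.idx.contains node = false then scRun f adj node S else S) S

-- the SCC → pair conversion with its seen-set
def pairInner (a : String) (bs : List String)
    (acc : List (String × String) × PySem.Set (String × String)) :
    List (String × String) × PySem.Set (String × String) :=
  bs.foldl (fun acc b =>
    let p := if b < a then (b, a) else (a, b)
    if PySem.Set.contains acc.2 p then acc else (acc.1 ++ [p], PySem.Set.add acc.2 p)) acc

def pairScc : List String → List (String × String) × PySem.Set (String × String) →
    List (String × String) × PySem.Set (String × String)
  | [], acc => acc
  | a :: rest, acc => pairScc rest (pairInner a rest acc)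

def pairPhase (sccs : List (List String)) : List (String × String) :=
  (sccs.foldl (fun acc scc => pairScc scc acc) ([], PySem.Set.empty)).1

def tjSt0 : TjSt :=
  { cnt := 0, stk := [], onStk := PySem.Set.empty,
    idx := PySem.Dict.empty, low := PySem.Dict.empty, sccs := [] }

def detect_circular_py (graph : List (String × List String)) : List (String × String) :=
  let g := PySem.Dict.ofList graph
  let adj := build_adj_py g
  -- fuel: strictly more than the number of distinct nodes ever visited
  let fuel := (adj.keys ++ adj.values.flatten).length + 1
  pairPhase (runRoots fuel adj adj.keys tjSt0).sccs

-- ===== PORT B =====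
-- Source B's `resolve`: membership test, then a hand-rolled scan over the key list
def suffixKey : List String → String → Option String
  | [], _ => none
  | k :: ks, inc =>
    if PySem.Str.endswith k inc || PySem.Str.endswith k ("/" ++ inc) then some k
    else suffixKey ks inc

def resolveB (g : PySem.Dict String (List String)) (inc : String) : Option String :=
  if g.contains inc then some inc else suffixKey g.keys inc

-- `[r for r in (resolve(i) for i in incs) if r]`
def edgesB (g : PySem.Dict String (List String)) (incs : List String) : List String :=
  incs.filterMap (fun inc =>
    match resolveB g inc with
    | some k => if k = "" then none else some k
    | none => none)

-- `adj = {node: [...] for node, incs in graph.items()}`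
def adjB (g : PySem.Dict String (List String)) : PySem.Dict String (List String) :=
  PySem.Dict.ofList (g.items.map (fun p => (p.1, edgesB g p.2)))

-- Source B's Tarjan state: clock, Tarjan stack (top-first), active set, discovery
-- times `disc`, lowlinks `back`, finished components
structure VSt where
  clock : Int
  tstk : List String
  act : PySem.Set String
  disc : PySem.Dict String Int
  back : PySem.Dict String Int
  comps : List (List String)
deriving Repr, DecidableEq

-- disc[w] = back[w] = clock; clock += 1; tstack.append(w); active.add(w)
def visitNew (w : String) (S : VSt) : VSt :=
  ⟨S.clock + 1, w :: S.tstk, PySem.Set.add S.act w,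
   S.disc.insert w S.clock, S.back.insert w S.clock, S.comps⟩

-- `dw = disc[w]; if dw < back[v]: back[v] = dw` — written as one insert of the
-- resulting value (v is always a key of `back` here, so the dict is unchanged
-- when the branch does not fire)
def relaxBack (v w : String) (S : VSt) : VSt :=
  let lv := S.back.getD v 0
  let dw := S.disc.getD w 0
  { S with back := S.back.insert v (if dw < lv then dw else lv) }

-- `if back[v] < back[u]: back[u] = back[v]` on the parent frame, same convention
def relaxChild (u v : String) (S : VSt) : VSt :=
  let lu := S.back.getD u 0
  let lv := S.back.getD v 0
  { S with back := S.back.insert u (if lv < lu then lv else lu) }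

-- position of the (unique) occurrence of v, for `tstack.index(v)` on a top-first list
def posOf (v : String) : List String → Nat
  | [] => 0
  | w :: rest => if w = v then 0 else posOf v rest + 1

-- `if back[v] == disc[v]: cut; comp = tstack[cut:][::-1]; del tstack[cut:];
--  active.difference_update(comp); if len(comp) > 1: comps.append(comp)`
def closeComp (v : String) (S : VSt) : VSt :=
  if S.back.getD v 0 = S.disc.getD v 0 then
    let k := posOf v S.tstk
    let c := S.tstk.take (k + 1)
    { S with tstk := S.tstk.drop (k + 1),
             act := c.foldl PySem.Set.discard S.act,
             comps := if 1 < c.length then S.comps ++ [c] else S.comps }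
  else S

-- termination apparatus for the frame loop: the universe of node names Tarjan can
-- ever visit, the count of yet-unvisited ones, and a weight on the frame stack
def tjU (adj : PySem.Dict String (List String)) : List String :=
  adj.keys ++ adj.values.flatten

def unvis (adj : PySem.Dict String (List String)) (idx : PySem.Dict String Int) : Nat :=
  (PySem.List.dedup (tjU adj)).countP (fun u => !(idx.contains u))

def frameWt (frames : List (String × List String)) : Nat :=
  (frames.map (fun p => 2 * p.2.length + 1)).sum

def bigC (adj : PySem.Dict String (List String)) : Nat :=
  2 * ((adj.values.map List.length).foldl max 0) + 2

-- termination facts (cited by machine's decreasing_by)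
theorem disc_closeComp (v : String) (S : VSt) : (closeComp v S).disc = S.disc := by
  unfold closeComp; split <;> rfl

theorem disc_relaxBack (v w : String) (S : VSt) : (relaxBack v w S).disc = S.disc := rfl
theorem disc_relaxChild (u v : String) (S : VSt) : (relaxChild u v S).disc = S.disc := rfl

theorem countP_insert_le (l : List String) (idx : PySem.Dict String Int) (w : String) (c : Int) :
    l.countP (fun u => !((idx.insert w c).contains u)) ≤ l.countP (fun u => !(idx.contains u)) := by
  apply List.countP_mono_left
  intro a _ h
  rw [PySem.Dict.contains_insert] at h
  cases hca : idx.contains a with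
  | false => simp
  | true => rw [hca] at h; simp at h

theorem unvis_insert_le (adj : PySem.Dict String (List String))
    (idx : PySem.Dict String Int) (w : String) (c : Int) :
    unvis adj (idx.insert w c) ≤ unvis adj idx := by
  unfold unvis
  exact countP_insert_le _ idx w c

theorem unvis_insert_lt (adj : PySem.Dict String (List String))
    (idx : PySem.Dict String Int) (w : String) (c : Int)
    (hU : w ∈ tjU adj) (hw : idx.contains w = false) :
    unvis adj (idx.insert w c) < unvis adj idx := by
  unfold unvis
  have hmem : w ∈ PySem.List.dedup (tjU adj) := (PySem.List.mem_dedup _ _).2 hU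
  obtain ⟨l₁, l₂, hsplit⟩ := List.append_of_mem hmem
  rw [hsplit, List.countP_append, List.countP_append, List.countP_cons, List.countP_cons]
  have h1 := countP_insert_le l₁ idx w c
  have h2 := countP_insert_le l₂ idx w c
  have hw1 : (!((idx.insert w c).contains w)) = false := by
    simp [PySem.Dict.contains_insert_self]
  have hw2 : (!(idx.contains w)) = true := by simp [hw]
  rw [hw1, hw2]
  simp
  omega

theorem len_getD_le (adj : PySem.Dict String (List String)) (w : String) :
    (adj.getD w []).length ≤ (adj.values.map List.length).foldl max 0 := by
  rw [PySem.Dict.getD_eq_get?_getD]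
  cases hg : adj.get? w with
  | none => simp
  | some l =>
    simp only [Option.getD_some]
    have hmem : (w, l) ∈ adj.items := PySem.Dict.mem_items_of_get?_eq_some adj hg
    have hlv : l ∈ adj.values := by
      simp only [PySem.Dict.values]
      exact List.mem_map_of_mem hmem
    have hml : l.length ∈ adj.values.map List.length := List.mem_map_of_mem hlv
    exact (PySem.List.le_foldl_max (adj.values.map List.length) 0).2 _ hml

theorem mem_keys_tjU (adj : PySem.Dict String (List String)) (k : String)
    (h : k ∈ adj.keys) : k ∈ tjU adj := List.mem_append_left _ h

-- Source B's `while frames:` loop: one recursion step per iteration; each frame holds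
-- the node and its not-yet-scanned successors
def machine (adj : PySem.Dict String (List String))
    (frames : List (String × List String)) (S : VSt) : VSt :=
  match frames with
  | [] => S
  | (v, ws) :: fs =>
    match ws with
    | w :: rest =>
      if hw : S.disc.contains w = false then
        machine adj ((w, adj.getD w []) :: (v, rest) :: fs) (visitNew w S)
      else if PySem.Set.contains S.act w then
        machine adj ((v, rest) :: fs) (relaxBack v w S)
      else
        machine adj ((v, rest) :: fs) S
    | [] =>
      let S1 := closeComp v S
      match fs with
      | [] => S1
      | (u, us) :: fs' => machine adj ((u, us) :: fs') (relaxChild u v S1)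
termination_by bigC adj * unvis adj S.disc + frameWt frames
decreasing_by
  · -- push a new frame for an unvisited successor w
    simp only [frameWt, List.map_cons, List.sum_cons, List.length_cons, visitNew]
    have hlen := len_getD_le adj w
    by_cases hU : w ∈ adj.keys
    · have hlt := unvis_insert_lt adj S.disc w S.clock (mem_keys_tjU adj w hU) hw
      have hmul : bigC adj * unvis adj (S.disc.insert w S.clock) + bigC adj ≤
          bigC adj * unvis adj S.disc := by
        have h1 : unvis adj (S.disc.insert w S.clock) + 1 ≤ unvis adj S.disc := hlt
        calc bigC adj * unvis adj (S.disc.insert w S.clock) + bigC adj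
            = bigC adj * (unvis adj (S.disc.insert w S.clock) + 1) := by ring
          _ ≤ bigC adj * unvis adj S.disc := Nat.mul_le_mul_left _ h1
      have hC : bigC adj = 2 * ((adj.values.map List.length).foldl max 0) + 2 := rfl
      omega
    · have hnil : adj.getD w [] = [] := by
        apply PySem.Dict.getD_of_not_contains
        rw [PySem.Dict.contains_eq_decide_mem_keys]
        simp [hU]
      have hle := unvis_insert_le adj S.disc w S.clock
      have hmul : bigC adj * unvis adj (S.disc.insert w S.clock) ≤
          bigC adj * unvis adj S.disc := Nat.mul_le_mul_left _ hle
      rw [hnil]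
      simp only [List.length_nil]
      omega
  · -- successor already visited and active
    simp only [frameWt, List.map_cons, List.sum_cons, List.length_cons, disc_relaxBack]
    omega
  · -- successor already visited, not active
    simp only [frameWt, List.map_cons, List.sum_cons, List.length_cons]
    omega
  · -- frame exhausted: pop it (component check + parent lowlink update)
    simp only [frameWt, List.map_cons, List.sum_cons, disc_relaxChild, disc_closeComp]
    omega

-- `for root in adj:` with the inline first-visit and the while loop
def driveB (adj : PySem.Dict String (List String)) (roots : List String) (S : VSt) : VSt :=
  roots.foldl (fun S root =>
    if S.disc.contains root then S
    else machine adj [(root, adj.getD root [])] (visitNew root S)) S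

-- the flat pair comprehension `[(a, b) if a <= b else (b, a) for comp … for b …]`
def tailsPairsB : List String → List (String × String)
  | [] => []
  | a :: rest => rest.map (fun b => if a ≤ b then (a, b) else (b, a)) ++ tailsPairsB rest

def vSt0 : VSt :=
  ⟨0, [], PySem.Set.empty, PySem.Dict.empty, PySem.Dict.empty, []⟩

def detect_circular_py_alt (graph : List (String × List String)) : List (String × String) :=
  let g := PySem.Dict.ofList graph
  let adj := adjB g
  let fin := driveB adj adj.keys vSt0
  -- list(dict.fromkeys(pairs))
  PySem.List.dedup (fin.comps.flatMap tailsPairsB)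

-- ===== PRECONDITION & SPEC =====
def Spec_detect_circular_py (graph : List (String × List String)) (out : List (String × String)) : Prop := out = detect_circular_py_alt graph
instance (graph : List (String × List String)) (out : List (String × String)) : Decidable (Spec_detect_circular_py graph out) := by unfold Spec_detect_circular_py; infer_instance

-- ===== CLAIM (what is proved, stated in full; the proofs are below) =====
def Claim_equal_detect_circular_py : Prop := ∀ (graph : List (String × List String)), Dom_detect_circular_py graph → Spec_detect_circular_py graph (detect_circular_py graph)

-- ===== LEMMAS AND PROOFS =====

theorem mem_getD_tjU (adj : PySem.Dict String (List String)) (v w : String)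
    (h : w ∈ adj.getD v []) : w ∈ tjU adj := by
  rw [PySem.Dict.getD_eq_get?_getD] at h
  cases hg : adj.get? v with
  | none => rw [hg] at h; simp at h
  | some l =>
    rw [hg] at h
    simp only [Option.getD_some] at h
    have hmem : (v, l) ∈ adj.items := PySem.Dict.mem_items_of_get?_eq_some adj hg
    have hlv : l ∈ adj.values := by
      simp only [PySem.Dict.values]; exact List.mem_map_of_mem hmem
    exact List.mem_append_right _ (List.mem_flatten.2 ⟨l, hlv, h⟩)

-- the field-renaming isomorphism between the two Tarjan states
def ofT (X : TjSt) : VSt := ⟨X.cnt, X.stk, X.onStk, X.idx, X.low, X.sccs⟩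

theorem visitNew_ofT (w : String) (X : TjSt) : visitNew w (ofT X) = ofT (tjInit w X) := rfl

theorem relaxBack_ofT (v w : String) (X : TjSt) :
    relaxBack v w (ofT X) = ofT (tjUpdIdx v w X) := by
  simp only [relaxBack, tjUpdIdx, ofT]
  have : (if X.idx.getD w 0 < X.low.getD v 0 then X.idx.getD w 0 else X.low.getD v 0)
      = min (X.low.getD v 0) (X.idx.getD w 0) := by omega
  rw [this]

theorem relaxChild_ofT (u v : String) (X : TjSt) :
    relaxChild u v (ofT X) = ofT (tjUpdLow u v X) := by
  simp only [relaxChild, tjUpdLow, ofT]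
  have : (if X.low.getD v 0 < X.low.getD u 0 then X.low.getD v 0 else X.low.getD u 0)
      = min (X.low.getD u 0) (X.low.getD v 0) := by omega
  rw [this]

-- the element-wise pop loop is the one-cut slice
theorem popLoop_eq (v : String) : ∀ (stk : List String) (onS : PySem.Set String)
    (acc : List String),
    popLoop v stk onS acc =
      (stk.drop (posOf v stk + 1),
       (stk.take (posOf v stk + 1)).foldl PySem.Set.discard onS,
       acc ++ stk.take (posOf v stk + 1)) := by
  intro stk
  induction stk with
  | nil => intro onS acc; simp [popLoop, posOf]
  | cons w rest IH =>
    intro onS acc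
    by_cases hw : w = v
    · subst hw
      simp [popLoop, posOf]
    · simp only [popLoop, posOf, if_neg hw]
      rw [IH]
      simp

theorem closeComp_ofT (v : String) (X : TjSt) : closeComp v (ofT X) = ofT (tjRoot v X) := by
  simp only [closeComp, tjRoot, ofT]
  split
  · rw [popLoop_eq]
    simp
  · rfl

-- step (unfolding) lemmas for the two Tarjan cores
theorem scRun_zero (adj : PySem.Dict String (List String)) (v : String) (S : TjSt) :
    scRun 0 adj v S = S := by rw [scRun]

theorem scRun_succ (f : Nat) (adj : PySem.Dict String (List String)) (v : String) (S : TjSt) :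
    scRun (f + 1) adj v S = tjRoot v (scSuccs f adj v (adj.getD v []) (tjInit v S)) := by
  rw [scRun]

theorem scSuccs_nil (f : Nat) (adj : PySem.Dict String (List String)) (v : String) (S : TjSt) :
    scSuccs f adj v [] S = S := by rw [scSuccs]

theorem scSuccs_cons (f : Nat) (adj : PySem.Dict String (List String)) (v w : String)
    (rest : List String) (S : TjSt) :
    scSuccs f adj v (w :: rest) S =
      (if S.idx.contains w = false then
        scSuccs f adj v rest (tjUpdLow v w (scRun f adj w S))
      else if PySem.Set.contains S.onStk w then
        scSuccs f adj v rest (tjUpdIdx v w S)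
      else
        scSuccs f adj v rest S) := by
  rw [scSuccs]

theorem machine_cons (adj : PySem.Dict String (List String)) (v w : String)
    (rest : List String) (fs : List (String × List String)) (S : VSt) :
    machine adj ((v, w :: rest) :: fs) S =
      (if S.disc.contains w = false then
        machine adj ((w, adj.getD w []) :: (v, rest) :: fs) (visitNew w S)
      else if PySem.Set.contains S.act w then
        machine adj ((v, rest) :: fs) (relaxBack v w S)
      else
        machine adj ((v, rest) :: fs) S) := by
  rw [machine]
  split <;> rfl

theorem machine_pop_nil (adj : PySem.Dict String (List String)) (v : String) (S : VSt) :
    machine adj [(v, [])] S = closeComp v S := by rw [machine]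

theorem machine_pop_cons (adj : PySem.Dict String (List String)) (v u : String)
    (us : List String) (fs' : List (String × List String)) (S : VSt) :
    machine adj ((v, []) :: (u, us) :: fs') S =
      machine adj ((u, us) :: fs') (relaxChild u v (closeComp v S)) := by
  rw [machine]

theorem idx_tjRoot (v : String) (S : TjSt) : (tjRoot v S).idx = S.idx := by
  unfold tjRoot; split <;> rfl

theorem idx_tjUpdLow (v w : String) (S : TjSt) : (tjUpdLow v w S).idx = S.idx := rfl
theorem idx_tjUpdIdx (v w : String) (S : TjSt) : (tjUpdIdx v w S).idx = S.idx := rfl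

-- indices only grow along A's recursion, so `unvis` never increases
theorem unvisA (f : Nat) :
    (∀ adj v S, unvis adj (scRun f adj v S).idx ≤ unvis adj S.idx) ∧
    (∀ adj v ws S, unvis adj (scSuccs f adj v ws S).idx ≤ unvis adj S.idx) := by
  induction f with
  | zero =>
    have hrun : ∀ adj v (S : TjSt), unvis adj (scRun 0 adj v S).idx ≤ unvis adj S.idx := by
      intro adj v S; rw [scRun_zero]
    refine ⟨hrun, ?_⟩
    intro adj v ws
    induction ws with
    | nil => intro S; rw [scSuccs_nil]
    | cons w rest IH =>
      intro S
      rw [scSuccs_cons]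
      split
      · calc unvis adj (scSuccs 0 adj v rest (tjUpdLow v w (scRun 0 adj w S))).idx
            ≤ unvis adj (tjUpdLow v w (scRun 0 adj w S)).idx := IH _
          _ = unvis adj (scRun 0 adj w S).idx := by rw [idx_tjUpdLow]
          _ ≤ unvis adj S.idx := hrun adj w S
      · split
        · calc unvis adj (scSuccs 0 adj v rest (tjUpdIdx v w S)).idx
              ≤ unvis adj (tjUpdIdx v w S).idx := IH _
            _ = unvis adj S.idx := by rw [idx_tjUpdIdx]
        · exact IH S
  | succ f IHf =>
    have hrun : ∀ adj v (S : TjSt), unvis adj (scRun (f + 1) adj v S).idx ≤ unvis adj S.idx := by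
      intro adj v S
      rw [scRun_succ, idx_tjRoot]
      calc unvis adj (scSuccs f adj v (adj.getD v []) (tjInit v S)).idx
          ≤ unvis adj (tjInit v S).idx := IHf.2 adj v _ _
        _ = unvis adj (S.idx.insert v S.cnt) := rfl
        _ ≤ unvis adj S.idx := unvis_insert_le adj S.idx v S.cnt
    refine ⟨hrun, ?_⟩
    intro adj v ws
    induction ws with
    | nil => intro S; rw [scSuccs_nil]
    | cons w rest IH =>
      intro S
      rw [scSuccs_cons]
      split
      · calc unvis adj (scSuccs (f + 1) adj v rest (tjUpdLow v w (scRun (f + 1) adj w S))).idx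
            ≤ unvis adj (tjUpdLow v w (scRun (f + 1) adj w S)).idx := IH _
          _ = unvis adj (scRun (f + 1) adj w S).idx := by rw [idx_tjUpdLow]
          _ ≤ unvis adj S.idx := hrun adj w S
      · split
        · calc unvis adj (scSuccs (f + 1) adj v rest (tjUpdIdx v w S)).idx
              ≤ unvis adj (tjUpdIdx v w S).idx := IH _
            _ = unvis adj S.idx := by rw [idx_tjUpdIdx]
        · exact IH S

-- THE SIMULATION: B's frame loop processes the top frame exactly as A's recursive
-- successor loop does (provided the fuel exceeds the number of unvisited nodes).
theorem sim (f : Nat) :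
    ∀ (adj : PySem.Dict String (List String)) (v : String) (ws : List String)
      (X : TjSt) (fs : List (String × List String)),
      (∀ w ∈ ws, w ∈ tjU adj) → unvis adj X.idx < f →
      machine adj ((v, ws) :: fs) (ofT X) =
        machine adj ((v, []) :: fs) (ofT (scSuccs f adj v ws X)) := by
  induction f using Nat.strong_induction_on with
  | _ f IHf =>
  intro adj v ws
  induction ws with
  | nil => intro X fs _ _; rw [scSuccs_nil]
  | cons w rest IHws =>
    intro X fs hws hf
    have hrest : ∀ x ∈ rest, x ∈ tjU adj := fun x hx => hws x (List.mem_cons_of_mem w hx)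
    rw [scSuccs_cons, machine_cons]
    have hdisc : (ofT X).disc = X.idx := rfl
    have hact : (ofT X).act = X.onStk := rfl
    rw [hdisc, hact]
    by_cases hw : X.idx.contains w = false
    · -- w unvisited: B pushes a frame, A recurses
      rw [if_pos hw, if_pos hw]
      have hwU : w ∈ tjU adj := hws w List.mem_cons_self
      have hlt := unvis_insert_lt adj X.idx w X.cnt hwU hw
      obtain ⟨f', rfl⟩ : ∃ f', f = f' + 1 := ⟨f - 1, by omega⟩
      have hf' : unvis adj (tjInit w X).idx < f' := by
        have : unvis adj (tjInit w X).idx = unvis adj (X.idx.insert w X.cnt) := rfl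
        omega
      rw [visitNew_ofT]
      rw [IHf f' (by omega) adj w (adj.getD w []) (tjInit w X) ((v, rest) :: fs)
            (fun x hx => mem_getD_tjU adj w x hx) hf']
      rw [machine_pop_cons, closeComp_ofT, relaxChild_ofT]
      rw [scRun_succ]
      have hf2 : unvis adj (tjUpdLow v w (tjRoot w
          (scSuccs f' adj w (adj.getD w []) (tjInit w X)))).idx < f' + 1 := by
        rw [idx_tjUpdLow, idx_tjRoot]
        have h1 := (unvisA f').2 adj w (adj.getD w []) (tjInit w X)
        omega
      exact IHws (tjUpdLow v w (tjRoot w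
        (scSuccs f' adj w (adj.getD w []) (tjInit w X)))) fs hrest hf2
    · rw [if_neg hw, if_neg hw]
      by_cases ho : PySem.Set.contains X.onStk w = true
      · rw [if_pos ho, if_pos ho, relaxBack_ofT]
        have hf2 : unvis adj (tjUpdIdx v w X).idx < f := by rw [idx_tjUpdIdx]; exact hf
        exact IHws (tjUpdIdx v w X) fs hrest hf2
      · rw [if_neg ho, if_neg ho]
        exact IHws X fs hrest hf

-- the root loops of the two ports agree
theorem roots_eq (keys : List String) :
    ∀ (f : Nat) (adj : PySem.Dict String (List String)) (X : TjSt),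
      (∀ k ∈ keys, k ∈ tjU adj) → unvis adj X.idx < f →
      ofT (runRoots f adj keys X) = driveB adj keys (ofT X) := by
  induction keys with
  | nil => intro f adj X _ _; rfl
  | cons k ks IH =>
    intro f adj X hk hf
    have hks : ∀ x ∈ ks, x ∈ tjU adj := fun x hx => hk x (List.mem_cons_of_mem k hx)
    simp only [runRoots, driveB, List.foldl_cons]
    have hdisc : (ofT X).disc = X.idx := rfl
    rw [hdisc]
    by_cases hvis : X.idx.contains k = false
    · rw [if_pos hvis, hvis]
      simp only [if_neg Bool.false_ne_true]
      have hkU : k ∈ tjU adj := hk k List.mem_cons_self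
      have hlt := unvis_insert_lt adj X.idx k X.cnt hkU hvis
      obtain ⟨f', rfl⟩ : ∃ f', f = f' + 1 := ⟨f - 1, by omega⟩
      have hf' : unvis adj (tjInit k X).idx < f' := by
        have : unvis adj (tjInit k X).idx = unvis adj (X.idx.insert k X.cnt) := rfl
        omega
      have hstep : machine adj [(k, adj.getD k [])] (visitNew k (ofT X))
          = ofT (scRun (f' + 1) adj k X) := by
        rw [visitNew_ofT]
        rw [sim f' adj k (adj.getD k []) (tjInit k X) []
              (fun x hx => mem_getD_tjU adj k x hx) hf']
        rw [machine_pop_nil, closeComp_ofT, scRun_succ]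
      rw [hstep]
      have hf2 : unvis adj (scRun (f' + 1) adj k X).idx < f' + 1 := by
        have := (unvisA (f' + 1)).1 adj k X
        omega
      have := IH (f' + 1) adj (scRun (f' + 1) adj k X) hks hf2
      simpa only [runRoots, driveB] using this
    · have hvis' : X.idx.contains k = true := by
        cases h : X.idx.contains k with
        | false => exact absurd h hvis
        | true => rfl
      rw [if_neg hvis, hvis']
      simp only [if_true]
      have := IH f adj X hks hf
      simpa only [runRoots, driveB] using this

-- the fixed fuel of port A is large enough: unvis never exceeds |tjU adj|
theorem len_foldl_add (xs : List String) :
    ∀ s : PySem.Set String, (xs.foldl PySem.Set.add s).length ≤ s.length + xs.length := by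
  induction xs with
  | nil => intro s; simp
  | cons x rest IH =>
    intro s
    simp only [List.foldl_cons, List.length_cons]
    have h1 := IH (PySem.Set.add s x)
    have h2 : (PySem.Set.add s x).length ≤ s.length + 1 := by
      rw [PySem.Set.add_eq_ite]
      split
      · omega
      · simp
    omega

theorem unvis_lt_fuel (adj : PySem.Dict String (List String)) (idx : PySem.Dict String Int) :
    unvis adj idx < (adj.keys ++ adj.values.flatten).length + 1 := by
  unfold unvis
  have h1 : (PySem.List.dedup (tjU adj)).countP (fun u => !(idx.contains u)) ≤
      (PySem.List.dedup (tjU adj)).length := List.countP_le_length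
  have h2 : (PySem.List.dedup (tjU adj)).length ≤ (tjU adj).length := by
    rw [PySem.List.dedup_eq_ofList, PySem.Set.ofList_eq_foldl]
    have := len_foldl_add (tjU adj) PySem.Set.empty
    simpa [PySem.Set.empty] using this
  rw [show adj.keys ++ adj.values.flatten = tjU adj from rfl]
  omega

-- ADJACENCY: the two resolutions agree
theorem suffixKey_eq (inc : String) : ∀ keys : List String,
    suffixKey keys inc = keys.find? (fun key =>
      PySem.Str.endswith key inc || PySem.Str.endswith key ("/" ++ inc)) := by
  intro keys
  induction keys with
  | nil => rfl
  | cons k ks IH =>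
    simp only [suffixKey, List.find?_cons]
    cases h : (PySem.Str.endswith k inc || PySem.Str.endswith k ("/" ++ inc)) with
    | true => simp
    | false => simp [IH]

theorem resolveB_eq (g : PySem.Dict String (List String)) (inc : String) :
    resolveB g inc = resolve_include_py inc g := by
  unfold resolveB resolve_include_py
  rw [PySem.Dict.contains_eq_isSome_get?, suffixKey_eq]

theorem edgesB_eq (g : PySem.Dict String (List String)) (incs : List String) :
    edgesB g incs = resolve_list_py incs g := by
  unfold edgesB resolve_list_py
  suffices h : ∀ acc : List String,
      incs.foldl (fun res inc =>
        match resolve_include_py inc g with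
        | some k => if k = "" then res else res ++ [k]
        | none => res) acc
      = acc ++ incs.filterMap (fun inc =>
          match resolveB g inc with
          | some k => if k = "" then none else some k
          | none => none) by
    have := h []
    simp at this
    rw [this]
  intro acc
  induction incs generalizing acc with
  | nil => simp
  | cons i rest IH =>
    simp only [List.foldl_cons, List.filterMap_cons]
    rw [resolveB_eq]
    cases hr : resolve_include_py i g with
    | none => simp only []; rw [IH]
    | some k =>
      by_cases hk : k = ""
      · simp only [if_pos hk]; rw [IH]
      · simp only [if_neg hk]; rw [IH]; simp

theorem adjB_eq (g : PySem.Dict String (List String)) : adjB g = build_adj_py g := by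
  unfold adjB build_adj_py
  show (g.items.map (fun p => (p.1, edgesB g p.2))).foldl
      (fun d p => d.insert p.1 p.2) PySem.Dict.empty = _
  rw [List.foldl_map]
  have hfe : (fun (d : PySem.Dict String (List String)) (p : String × List String) =>
      d.insert p.1 (edgesB g p.2)) = (fun d p => d.insert p.1 (resolve_list_py p.2 g)) := by
    funext d p
    rw [edgesB_eq]
  rw [hfe]

-- PAIR PHASE: the seen-set fold is dict.fromkeys over the flat pair list
def pairStep (acc : List (String × String) × PySem.Set (String × String))
    (p : String × String) : List (String × String) × PySem.Set (String × String) :=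
  if PySem.Set.contains acc.2 p then acc else (acc.1 ++ [p], PySem.Set.add acc.2 p)

def tailsPairsA : List String → List (String × String)
  | [] => []
  | a :: rest => rest.map (fun b => if b < a then (b, a) else (a, b)) ++ tailsPairsA rest

theorem pairInner_eq (a : String) (bs : List String)
    (acc : List (String × String) × PySem.Set (String × String)) :
    pairInner a bs acc = (bs.map (fun b => if b < a then (b, a) else (a, b))).foldl pairStep acc := by
  unfold pairInner
  rw [List.foldl_map]
  rfl

theorem pairScc_eq : ∀ (scc : List String)
    (acc : List (String × String) × PySem.Set (String × String)),
    pairScc scc acc = (tailsPairsA scc).foldl pairStep acc := by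
  intro scc
  induction scc with
  | nil => intro acc; rfl
  | cons a rest IH =>
    intro acc
    simp only [pairScc, tailsPairsA, List.foldl_append]
    rw [IH, pairInner_eq]

theorem tailsPairs_eq : ∀ scc : List String, tailsPairsA scc = tailsPairsB scc := by
  intro scc
  induction scc with
  | nil => rfl
  | cons a rest IH =>
    simp only [tailsPairsA, tailsPairsB, IH]
    congr 1
    apply List.map_congr_left
    intro b _
    by_cases h : a ≤ b
    · simp [h, not_lt_of_ge h]
    · simp [h, lt_of_not_ge h]

theorem pairStep_diag : ∀ (ps : List (String × String)) (s : PySem.Set (String × String)),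
    ps.foldl pairStep (s, s) = (ps.foldl PySem.Set.add s, ps.foldl PySem.Set.add s) := by
  intro ps
  induction ps with
  | nil => intro s; rfl
  | cons p rest IH =>
    intro s
    simp only [List.foldl_cons]
    have hstep : pairStep (s, s) p = (PySem.Set.add s p, PySem.Set.add s p) := by
      unfold pairStep
      rw [PySem.Set.add_eq_ite]
      by_cases h : PySem.Set.contains s p
      · have hm : p ∈ s := by simpa [PySem.Set.contains] using h
        simp [hm]
      · have hm : ¬ p ∈ s := by simpa [PySem.Set.contains] using h
        simp [hm]
    rw [hstep, IH]

theorem foldl_pairScc_flat : ∀ (sccs : List (List String))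
    (acc : List (String × String) × PySem.Set (String × String)),
    sccs.foldl (fun acc scc => pairScc scc acc) acc
      = (sccs.flatMap tailsPairsA).foldl pairStep acc := by
  intro sccs
  induction sccs with
  | nil => intro acc; rfl
  | cons scc rest IH =>
    intro acc
    simp only [List.foldl_cons, List.flatMap_cons, List.foldl_append]
    rw [IH, pairScc_eq]

theorem pairPhase_eq (sccs : List (List String)) :
    pairPhase sccs = PySem.List.dedup (sccs.flatMap tailsPairsB) := by
  unfold pairPhase
  rw [foldl_pairScc_flat]
  have hfun : tailsPairsA = tailsPairsB := funext tailsPairs_eq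
  rw [hfun]
  have h0 : (PySem.Set.empty : PySem.Set (String × String)) = [] := rfl
  rw [show (([], PySem.Set.empty) : List (String × String) × PySem.Set (String × String))
        = ((PySem.Set.empty : PySem.Set (String × String)), PySem.Set.empty) from rfl]
  rw [pairStep_diag]
  rw [PySem.List.dedup_eq_ofList, PySem.Set.ofList_eq_foldl]
  rfl

-- ===== VERDICT (by name: the statement is the Claim_ definition above) =====
theorem detect_circular_py_spec : Claim_equal_detect_circular_py := by
  intro graph _
  unfold Spec_detect_circular_py detect_circular_py detect_circular_py_alt
  simp only []
  rw [adjB_eq]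
  have hroots := roots_eq (build_adj_py (PySem.Dict.ofList graph)).keys
    (((build_adj_py (PySem.Dict.ofList graph)).keys ++
      (build_adj_py (PySem.Dict.ofList graph)).values.flatten).length + 1)
    (build_adj_py (PySem.Dict.ofList graph)) tjSt0
    (fun k hk => mem_keys_tjU _ k hk)
    (unvis_lt_fuel _ _)
  have hofT0 : (ofT tjSt0) = vSt0 := rfl
  rw [hofT0] at hroots
  rw [← hroots]
  have hcomps : (ofT (runRoots (((build_adj_py (PySem.Dict.ofList graph)).keys ++
      (build_adj_py (PySem.Dict.ofList graph)).values.flatten).length + 1)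
      (build_adj_py (PySem.Dict.ofList graph))
      (build_adj_py (PySem.Dict.ofList graph)).keys tjSt0)).comps
    = (runRoots (((build_adj_py (PySem.Dict.ofList graph)).keys ++
      (build_adj_py (PySem.Dict.ofList graph)).values.flatten).length + 1)
      (build_adj_py (PySem.Dict.ofList graph))
      (build_adj_py (PySem.Dict.ofList graph)).keys tjSt0).sccs := rfl
  rw [hcomps]
  exact pairPhase_eq _
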